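-- pv_equiv track=rewrite | github.com/jeremygould94/projects | customer_feedback_review1.py | clause_list
-- ===== SOURCE A (Python) =====
-- def clause_list(sentence):
--     split_sentence = sentence.lower()
--     # Replace duplicates of ! and ? and change ?! into ?
--     while split_sentence.find("!!") != -1:
--         split_sentence = split_sentence.replace("!!", "!")
--     while split_sentence.find("??") != -1:
--         split_sentence = split_sentence.replace("??", "?")
--     while split_sentence.find("!?") != -1:
--         split_sentence = split_sentence.replace("!?", "?")
--     while split_sentence.find("?!") != -1:
--         split_sentence = split_sentence.replace("?!", "?")
--     # Initialize clauses list and define possible splits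
--     clauses = []
--     splits = ["however",
--               "but",
--               "and",
--               ".",
--               ",",
--               ";",
--               "?",
--               "!",
--               "except"]
--     # add a space before punctuation, so we can separate easily with split method
--     split_sentence = split_sentence.replace(".", " .")
--     split_sentence = split_sentence.replace(",", " ,")
--     split_sentence = split_sentence.replace(";", " ;")
--     split_sentence = split_sentence.replace("?", " ?")
--     split_sentence = split_sentence.replace("!", " !")
--     # while sentence contains split words, loop until sections are all entered into list separately
--     # separate sentence into words and get indexes of anything in the "splits" list
--     # we then cut around these indexes, dropping the "split" item, and then reform the sentence into sections
--     split_sentence_list = split_sentence.split()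
--     splits_pos = []
--     for idx, word in enumerate(split_sentence_list):
--         for split in splits:
--             if word.find(split) != -1:
--                 splits_pos.append(idx)
--     if splits_pos:
--         list_of_splits = []
--         split_start = 0
--         while splits_pos:
--             split_to_add = split_sentence_list[split_start:splits_pos[0]]
--             if split_to_add:
--                 list_of_splits.append(split_to_add)
--             split_start = splits_pos[0] + 1
--             splits_pos.pop(0)
--         for word_list in list_of_splits:
--             section_to_add = " ".join(word_list)
--             clauses.append(section_to_add)
--     else:
--         clauses.append(split_sentence)
--
--     return clauses
-- ===== SOURCE B (Python) =====
-- SPLITS = ["however", "but", "and", ".", ",", ";", "?", "!", "except"]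
--
--
-- def _preprocess(sentence):
--     s = sentence.lower()
--     while s.find("!!") != -1:
--         s = s.replace("!!", "!")
--     while s.find("??") != -1:
--         s = s.replace("??", "?")
--     while s.find("!?") != -1:
--         s = s.replace("!?", "?")
--     while s.find("?!") != -1:
--         s = s.replace("?!", "?")
--     s = s.replace(".", " .")
--     s = s.replace(",", " ,")
--     s = s.replace(";", " ;")
--     s = s.replace("?", " ?")
--     s = s.replace("!", " !")
--     return s
--
--
-- def clause_list(sentence):
--     s = _preprocess(sentence)
--     clauses = []
--     buf = []
--     found = False
--     for word in s.split():
--         if any(word.find(m) != -1 for m in SPLITS):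
--             found = True
--             if buf:
--                 clauses.append(" ".join(buf))
--             buf = []
--         else:
--             buf.append(word)
--     return clauses if found else [s]
-- ===== Notes on version B (the rewrite author's own statement) =====
-- stated objective: simpler
-- what changed: A's two-phase core (collect all marker word indices into splits_pos, then repeatedly slice the word list around them) is replaced by a single streaming pass over the words with a buffer and a found flag, flushing the buffer at each marker; preprocessing (lowercasing, punctuation collapsing and padding) is kept verbatim.
import Mathlib
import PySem

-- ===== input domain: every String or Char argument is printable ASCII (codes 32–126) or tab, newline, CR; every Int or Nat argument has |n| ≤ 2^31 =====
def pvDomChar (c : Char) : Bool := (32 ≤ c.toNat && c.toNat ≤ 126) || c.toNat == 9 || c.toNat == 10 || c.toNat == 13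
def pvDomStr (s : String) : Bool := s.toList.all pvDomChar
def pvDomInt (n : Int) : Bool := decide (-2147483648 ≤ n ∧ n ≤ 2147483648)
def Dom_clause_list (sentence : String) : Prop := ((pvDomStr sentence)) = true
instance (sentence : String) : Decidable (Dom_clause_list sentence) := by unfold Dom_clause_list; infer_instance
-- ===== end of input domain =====

-- B replaces A's two-phase core (collect marker indices, then slice around them) by a single
-- streaming pass with a buffer and a found flag; objective: simpler, same behaviour (including
-- A's dropped trailing segment and the padded-string fallback when no marker occurs).

-- the split-marker list shared by both Pythons
def pySplits : List String := ["however", "but", "and", ".", ",", ";", "?", "!", "except"]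

-- repeated `while s.find(pat) != -1: s = s.replace(pat, rep)`; each iteration strictly shrinks
-- the string, so fuel = len(s)+1 never runs out (used by both ports, as in both Pythons)
def whileReplace (pat rep : String) : Nat → String → String
  | 0, s => s
  | fuel + 1, s =>
      if PySem.Str.find s pat ≠ -1 then whileReplace pat rep fuel (PySem.Str.replace s pat rep)
      else s

-- ===== PORT A =====
-- the `while splits_pos:` slicing loop of A (split_start, pop from the front, skip empty slices)
def aSlices (ws : List String) : Int → List Int → List (List String)
  | _, [] => []
  | start, p :: ps =>
      let seg := PySem.List.slice ws (some start) (some p)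
      if seg ≠ [] then seg :: aSlices ws (p + 1) ps else aSlices ws (p + 1) ps

def clause_list (sentence : String) : List String :=
  let s0 := PySem.Str.lower sentence
  let s1 := whileReplace "!!" "!" ((PySem.Str.len s0).toNat + 1) s0
  let s2 := whileReplace "??" "?" ((PySem.Str.len s1).toNat + 1) s1
  let s3 := whileReplace "!?" "?" ((PySem.Str.len s2).toNat + 1) s2
  let s4 := whileReplace "?!" "?" ((PySem.Str.len s3).toNat + 1) s3
  let p1 := PySem.Str.replace s4 "." " ."
  let p2 := PySem.Str.replace p1 "," " ,"
  let p3 := PySem.Str.replace p2 ";" " ;"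
  let p4 := PySem.Str.replace p3 "?" " ?"
  let split_sentence := PySem.Str.replace p4 "!" " !"
  let split_sentence_list := PySem.Str.split₀ split_sentence
  let splits_pos := (PySem.List.enumerate split_sentence_list).foldl
    (fun acc iw => pySplits.foldl
      (fun a sp => if PySem.Str.find iw.2 sp != -1 then a ++ [iw.1] else a) acc) []
  if splits_pos ≠ [] then
    (aSlices split_sentence_list 0 splits_pos).foldl
      (fun clauses seg => clauses ++ [PySem.Str.join " " seg]) []
  else [split_sentence]

-- ===== PORT B =====
def preprocess_alt (sentence : String) : String :=
  let s0 := PySem.Str.lower sentence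
  let s1 := whileReplace "!!" "!" ((PySem.Str.len s0).toNat + 1) s0
  let s2 := whileReplace "??" "?" ((PySem.Str.len s1).toNat + 1) s1
  let s3 := whileReplace "!?" "?" ((PySem.Str.len s2).toNat + 1) s2
  let s4 := whileReplace "?!" "?" ((PySem.Str.len s3).toNat + 1) s3
  let p1 := PySem.Str.replace s4 "." " ."
  let p2 := PySem.Str.replace p1 "," " ,"
  let p3 := PySem.Str.replace p2 ";" " ;"
  let p4 := PySem.Str.replace p3 "?" " ?"
  PySem.Str.replace p4 "!" " !"

def clause_list_alt (sentence : String) : List String :=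
  let s := preprocess_alt sentence
  let st := (PySem.Str.split₀ s).foldl
    (fun (st : List String × List String × Bool) w =>
      if pySplits.any (fun m => PySem.Str.find w m != -1) then
        ((if st.2.1 ≠ [] then st.1 ++ [PySem.Str.join " " st.2.1] else st.1), [], true)
      else (st.1, st.2.1 ++ [w], st.2.2))
    ([], [], false)
  if st.2.2 then st.1 else [s]

-- ===== PRECONDITION & SPEC =====
def Spec_clause_list (sentence : String) (out : List String) : Prop := out = clause_list_alt sentence
instance (sentence : String) (out : List String) : Decidable (Spec_clause_list sentence out) := by unfold Spec_clause_list; infer_instance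

-- ===== CLAIM (what is proved, stated in full; the proofs are below) =====
def Claim_equal_clause_list : Prop := ∀ (sentence : String), Dom_clause_list sentence → Spec_clause_list sentence (clause_list sentence)

-- ===== LEMMAS AND PROOFS =====

-- proof-side vocabulary
def pvMarker (w : String) : Bool := pySplits.any (fun m => PySem.Str.find w m != -1)

def pvCnt (w : String) : Nat := (pySplits.filter (fun m => PySem.Str.find w m != -1)).length

-- the marker positions A's first loop collects, as a function of the word list (offset i)
def posFrom : Nat → List String → List Int
  | _, [] => []
  | i, w :: t => List.replicate (pvCnt w) (i : Int) ++ posFrom (i + 1) t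

-- the clause segments both programs produce (buffer-passing form)
def chunks : List String → List String → List (List String)
  | _, [] => []
  | buf, w :: t =>
      if pvMarker w then (if buf ≠ [] then [buf] else []) ++ chunks [] t
      else chunks (buf ++ [w]) t

-- B's trailing buffer (never flushed)
def tailBuf : List String → List String → List String
  | buf, [] => buf
  | buf, w :: t => if pvMarker w then tailBuf [] t else tailBuf (buf ++ [w]) t

-- B's loop body, named (definitionally equal to the lambda in clause_list_alt)
def pvStep (st : List String × List String × Bool) (w : String) : List String × List String × Bool :=
  if pvMarker w then
    ((if st.2.1 ≠ [] then st.1 ++ [PySem.Str.join " " st.2.1] else st.1), [], true)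
  else (st.1, st.2.1 ++ [w], st.2.2)

theorem cnt_eq_zero_iff (w : String) : pvCnt w = 0 ↔ pvMarker w = false := by
  simp [pvCnt, pvMarker, List.length_eq_zero_iff, List.filter_eq_nil_iff, List.any_eq_false]

theorem splits_pos_eq (t : List String) (i : Nat) (acc : List Int) :
    (PySem.List.enumerate t (i : Int)).foldl
      (fun acc iw => pySplits.foldl
        (fun a sp => if PySem.Str.find iw.2 sp != -1 then a ++ [iw.1] else a) acc) acc
      = acc ++ posFrom i t := by
  induction t generalizing i acc with
  | nil => simp [PySem.List.enumerate, posFrom]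
  | cons w t ih =>
      show (PySem.List.enumerate t ((i : Int) + 1)).foldl _ (pySplits.foldl _ acc) = _
      have h1 : pySplits.foldl (fun a sp => if PySem.Str.find w sp != -1 then a ++ [(i : Int)] else a) acc
          = acc ++ List.replicate (pvCnt w) (i : Int) := by
        rw [PySem.List.foldl_append_if (fun sp => PySem.Str.find w sp != -1) (fun _ => (i : Int))]
        simp [pvCnt, List.map_const']
      have h2 : ((i : Int) + 1) = ((i + 1 : Nat) : Int) := by push_cast; ring
      rw [h1, h2, ih (i + 1)]
      simp [posFrom]

theorem posFrom_nil_iff (t : List String) (i : Nat) :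
    posFrom i t = [] ↔ t.any pvMarker = false := by
  induction t generalizing i with
  | nil => simp [posFrom]
  | cons w t ih =>
      simp [posFrom, List.replicate_eq_nil_iff, ih, cnt_eq_zero_iff]

theorem aSlices_replicate (W : List String) (i : Nat) (m : Nat) (ps : List Int) :
    aSlices W ((i : Int) + 1) (List.replicate m (i : Int) ++ ps) = aSlices W ((i : Int) + 1) ps := by
  induction m with
  | zero => rfl
  | succ m ih =>
      have hc : ((i : Int) + 1) = ((i + 1 : Nat) : Int) := by push_cast; ring
      have hseg : PySem.List.slice W (some ((i : Int) + 1)) (some (i : Int)) = [] := by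
        rw [hc, PySem.List.slice_natCast]
        simp
      simp only [List.replicate_succ, List.cons_append, aSlices, hseg]
      simpa using ih

theorem aSlices_posFrom (t : List String) (W : List String) (i s : Nat)
    (ht : W.drop i = t) (hsi : s ≤ i) :
    aSlices W (s : Int) (posFrom i t) = chunks ((W.drop s).take (i - s)) t := by
  induction t generalizing i s with
  | nil => simp [posFrom, aSlices, chunks]
  | cons w t ih =>
      have hWi : W[i]? = some w := by
        have h0 : (List.drop i W)[0]? = some w := by rw [ht]; rfl
        simpa [List.getElem?_drop] using h0
      have hdrop1 : W.drop (i + 1) = t := by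
        have h1 : List.drop 1 (List.drop i W) = List.drop 1 (w :: t) := by rw [ht]
        simpa [List.drop_drop, Nat.add_comm] using h1
      by_cases h : pvMarker w = true
      · -- marker word: cut here
        rcases Nat.exists_eq_succ_of_ne_zero (fun h0 => by
            rw [(cnt_eq_zero_iff w).1 h0] at h; exact Bool.false_ne_true h) with ⟨k, hk⟩
        have hseg : PySem.List.slice W (some (s : Int)) (some (i : Int))
            = (W.drop s).take (i - s) := by
          have := PySem.List.slice_natCast W s i
          simpa using this
        have hstep : posFrom i (w :: t) = (i : Int) :: (List.replicate k (i : Int) ++ posFrom (i + 1) t) := by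
          simp [posFrom, hk, List.replicate_succ]
        have hc : ((i : Int) + 1) = ((i + 1 : Nat) : Int) := by push_cast; ring
        rw [hstep]
        simp only [aSlices]
        rw [aSlices_replicate W i k, hc, ih (i + 1) (i + 1) hdrop1 (le_refl _), hseg]
        simp only [Nat.sub_self, List.take_zero]
        simp only [chunks, h, if_true]
        split <;> simp
      · -- non-marker word: extend the buffer
        have h0 : pvCnt w = 0 := (cnt_eq_zero_iff w).2 (by simpa using h)
        have hbuf : (W.drop s).take (i + 1 - s) = (W.drop s).take (i - s) ++ [w] := by
          have h1 : i + 1 - s = (i - s) + 1 := by omega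
          rw [h1, List.take_add_one]
          have h2 : (List.drop s W)[i - s]? = some w := by
            rw [List.getElem?_drop]
            have h3 : s + (i - s) = i := by omega
            rw [h3, hWi]
          simp [h2]
        have hstep : posFrom i (w :: t) = posFrom (i + 1) t := by simp [posFrom, h0]
        rw [hstep, ih (i + 1) s hdrop1 (by omega), hbuf]
        simp [chunks, h]

theorem bFold (t : List String) (cl buf : List String) (fnd : Bool) :
    t.foldl pvStep (cl, buf, fnd)
      = (cl ++ (chunks buf t).map (PySem.Str.join " "), tailBuf buf t, fnd || t.any pvMarker) := by
  induction t generalizing cl buf fnd with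
  | nil => simp [chunks, tailBuf]
  | cons w t ih =>
      rw [List.foldl_cons]
      by_cases h : pvMarker w = true
      · rw [show pvStep (cl, buf, fnd) w
            = ((if buf ≠ [] then cl ++ [PySem.Str.join " " buf] else cl), [], true) from by
          simp [pvStep, h]]
        rw [ih]
        simp only [chunks, tailBuf, h, if_true, List.any_cons, Bool.true_or, Bool.or_true]
        split <;> simp
      · rw [show pvStep (cl, buf, fnd) w = (cl, buf ++ [w], fnd) from by simp [pvStep, h]]
        rw [ih]
        simp only [chunks, tailBuf, h, List.any_cons, Bool.false_or]
        simp

-- both cores agree as functions of the padded string P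
theorem core_eq (P : String) :
    (let ws := PySem.Str.split₀ P
     let splits_pos := (PySem.List.enumerate ws).foldl
       (fun acc iw => pySplits.foldl
         (fun a sp => if PySem.Str.find iw.2 sp != -1 then a ++ [iw.1] else a) acc) []
     if splits_pos ≠ [] then
       (aSlices ws 0 splits_pos).foldl
         (fun clauses seg => clauses ++ [PySem.Str.join " " seg]) []
     else [P])
    = (let st := (PySem.Str.split₀ P).foldl
         (fun (st : List String × List String × Bool) w =>
           if pySplits.any (fun m => PySem.Str.find w m != -1) then
             ((if st.2.1 ≠ [] then st.1 ++ [PySem.Str.join " " st.2.1] else st.1), [], true)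
           else (st.1, st.2.1 ++ [w], st.2.2))
         ([], [], false)
       if st.2.2 then st.1 else [P]) := by
  simp only []
  generalize PySem.Str.split₀ P = W
  have hstep : (fun (st : List String × List String × Bool) w =>
      if pySplits.any (fun m => PySem.Str.find w m != -1) then
        ((if st.2.1 ≠ [] then st.1 ++ [PySem.Str.join " " st.2.1] else st.1), [], true)
      else (st.1, st.2.1 ++ [w], st.2.2)) = pvStep := rfl
  have hpos : (PySem.List.enumerate W).foldl
      (fun acc iw => pySplits.foldl
        (fun a sp => if PySem.Str.find iw.2 sp != -1 then a ++ [iw.1] else a) acc) ([] : List Int)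
      = posFrom 0 W := by
    have h := splits_pos_eq W 0 []
    simpa using h
  rw [hstep, bFold, hpos]
  by_cases hm : W.any pvMarker = true
  · rw [if_pos (by rw [Ne, posFrom_nil_iff]; simp [hm]), if_pos (by simp [hm])]
    rw [PySem.List.foldl_append_singleton_eq_map]
    have h := aSlices_posFrom W W 0 0 rfl (le_refl _)
    simp only [Nat.cast_zero, Nat.sub_self, List.take_zero, List.drop_zero] at h
    rw [h]
  · simp only [Bool.not_eq_true] at hm
    rw [if_neg (by rw [Ne, posFrom_nil_iff]; simp [hm]), if_neg (by simp [hm])]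

-- A's body, written over the named padded string (pure zeta/delta refolding)
theorem clause_list_refold (sentence : String) :
    clause_list sentence =
      (let ws := PySem.Str.split₀ (preprocess_alt sentence)
       let splits_pos := (PySem.List.enumerate ws).foldl
         (fun acc iw => pySplits.foldl
           (fun a sp => if PySem.Str.find iw.2 sp != -1 then a ++ [iw.1] else a) acc) []
       if splits_pos ≠ [] then
         (aSlices ws 0 splits_pos).foldl
           (fun clauses seg => clauses ++ [PySem.Str.join " " seg]) []
       else [preprocess_alt sentence]) := rfl

-- ===== VERDICT (by name: the statement is the Claim_ definition above) =====
theorem clause_list_spec : Claim_equal_clause_list := by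
  intro sentence _
  unfold Spec_clause_list
  rw [clause_list_refold]
  unfold clause_list_alt
  exact core_eq (preprocess_alt sentence)
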